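-- pv_equiv track=rewrite | github.com/msuliq/foobar_challenge_2022 | foobar_challenge_1.py | solution5
-- ===== SOURCE A (Python) =====
-- def solution5(data, n):
--     if n > 0:
--         occurrences = {}
--         # count occurrences
--         for item in data:
--             occurrences[item] = occurrences.get(item, 0) + 1
--         # return trimmed data
--         data.clear()
--         for k, v in occurrences.items():
--             if v <= n:
--                 data.append(k)
--         return data
--     else:
--         return []
-- ===== SOURCE B (Python) =====
-- def solution5(data, n):
--     # Streaming one pass: append each item on first sight, evict it the moment
--     # its running count crosses n. Like A, mutates and returns the same list
--     # object when n > 0; returns a new [] otherwise.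
--     if n <= 0:
--         return []
--     seen = {}
--     result = []
--     for x in data:
--         c = seen.get(x, 0) + 1
--         seen[x] = c
--         if c == 1:
--             result.append(x)
--         elif c == n + 1:
--             result.remove(x)
--     data[:] = result
--     return data
-- ===== Notes on version B (the rewrite author's own statement) =====
-- stated objective: alternative
-- what changed: Replaces A's two-phase count-then-filter (build a full counter dict, then a second pass over its items) with a single streaming pass that appends each item on first sight and evicts it from the result the moment its running count crosses n.
import Mathlib
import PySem

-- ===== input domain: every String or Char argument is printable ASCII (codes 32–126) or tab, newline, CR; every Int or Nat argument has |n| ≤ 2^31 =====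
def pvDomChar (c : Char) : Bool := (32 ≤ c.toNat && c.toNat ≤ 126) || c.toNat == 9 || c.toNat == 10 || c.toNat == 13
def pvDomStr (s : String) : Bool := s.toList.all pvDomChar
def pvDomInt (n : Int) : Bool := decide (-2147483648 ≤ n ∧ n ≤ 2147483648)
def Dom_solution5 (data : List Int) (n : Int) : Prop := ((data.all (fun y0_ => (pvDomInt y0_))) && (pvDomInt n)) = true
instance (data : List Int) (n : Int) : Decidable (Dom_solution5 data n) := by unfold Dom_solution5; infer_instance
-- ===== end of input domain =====

-- B replaces A's count-then-filter (build a full counter, then a second pass over its items) with a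
-- single streaming pass that appends each item on first sight and evicts it the moment its running
-- count crosses n (objective: alternative). Both Pythons mutate `data` in place and return the same
-- object when n > 0; the equivalence proved here is about the return value.

-- ===== PORT A =====
-- counts via occurrences[item] = occurrences.get(item, 0) + 1, then one append pass over items
def solution5 (data : List Int) (n : Int) : List Int :=
  if n > 0 then
    let occurrences :=
      data.foldl (fun d x => d.insert x (d.getD x 0 + 1)) PySem.Dict.empty
    occurrences.items.foldl (fun acc p => if p.2 ≤ n then acc ++ [p.1] else acc) []
  else []

-- ===== PORT B =====
-- loop body: c = seen.get(x,0)+1; seen[x] = c; append on c == 1, remove on c == n+1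
def bStep (n : Int) (st : PySem.Dict Int Int × List Int) (x : Int) :
    PySem.Dict Int Int × List Int :=
  let c := st.1.getD x 0 + 1
  let seen := st.1.insert x c
  if c = 1 then (seen, st.2 ++ [x])
  else if c = n + 1 then
    -- result.remove(x): x is always present here, so Python's ValueError cannot occur
    (seen, (PySem.List.remove? st.2 x).getD st.2)
  else (seen, st.2)

def solution5_alt (data : List Int) (n : Int) : List Int :=
  if n ≤ 0 then []
  else (data.foldl (bStep n) (PySem.Dict.empty, [])).2

-- ===== PRECONDITION & SPEC =====
def Spec_solution5 (data : List Int) (n : Int) (out : List Int) : Prop := out = solution5_alt data n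
instance (data : List Int) (n : Int) (out : List Int) : Decidable (Spec_solution5 data n out) := by unfold Spec_solution5; infer_instance

-- ===== CLAIM =====
def Claim_equal_solution5 : Prop := ∀ (data : List Int) (n : Int), Dom_solution5 data n → Spec_solution5 data n (solution5 data n)

-- ===== LEMMAS AND PROOFS =====

-- A's append pass over the counter's (key, count) items is a filter of the keys by their count
theorem foldl_items_pairs (m : Int) (cnt : Int → Int) (l acc : List Int) :
    (l.map (fun k => (k, cnt k))).foldl
      (fun acc p => if p.2 ≤ m then acc ++ [p.1] else acc) acc
    = acc ++ l.filter (fun k => decide (cnt k ≤ m)) := by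
  induction l generalizing acc with
  | nil => simp
  | cons x xs ih =>
    simp only [List.map_cons, List.foldl_cons, List.filter_cons]
    by_cases h : cnt x ≤ m
    · simp [h, ih]
    · simp [h, ih]

theorem dedup_append_singleton (p : List Int) (x : Int) :
    PySem.List.dedup (p ++ [x]) =
      if x ∈ p then PySem.List.dedup p else PySem.List.dedup p ++ [x] := by
  simp only [PySem.List.dedup_eq_ofList, PySem.Set.ofList_eq_foldl, List.foldl_append,
    List.foldl_cons, List.foldl_nil]
  rw [← PySem.Set.ofList_eq_foldl, PySem.Set.add_eq_ite]
  by_cases h : x ∈ p <;> simp [h, PySem.Set.mem_ofList]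

-- flipping the predicate to false at one element of a nodup list erases it from the filter
theorem filter_flip_erase {l : List Int} (hl : l.Nodup) (q r : Int → Bool) (x : Int)
    (hx : q x = false) (hr : r x = true) (hother : ∀ y, y ≠ x → q y = r y) :
    l.filter q = (l.filter r).erase x := by
  induction l with
  | nil => simp
  | cons a as ih =>
    rcases List.nodup_cons.mp hl with ⟨hna, has⟩
    by_cases hax : a = x
    · subst hax
      rw [List.filter_cons, List.filter_cons, hx, hr]
      have : as.filter q = as.filter r :=
        List.filter_congr (fun y hy => hother y (fun h => hna (h ▸ hy)))
      simpa using this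
    · rw [List.filter_cons, List.filter_cons, hother a hax]
      cases hra : r a
      · simpa using ih has
      · simp [ih has, List.erase_cons_tail (show ¬(a == x) by simp [hax])]

-- loop invariant for B: after consuming `rest` on top of prefix `p`, the result list is the
-- survivors of dedup (p ++ rest) under the final counts
theorem bLoop_inv (n : Int) (hn : 1 ≤ n) (rest : List Int) :
    ∀ (p : List Int) (d : PySem.Dict Int Int),
      (∀ y, d.getD y 0 = (p.count y : Int)) →
      (rest.foldl (bStep n)
        (d, (PySem.List.dedup p).filter (fun y => decide ((p.count y : Int) ≤ n)))).2
      = (PySem.List.dedup (p ++ rest)).filter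
          (fun y => decide (((p ++ rest).count y : Int) ≤ n)) := by
  induction rest with
  | nil => intro p d _; simp
  | cons x xs ih =>
    intro p d hd
    have hcnt : ∀ y, ((p ++ [x]).count y : Int) =
        if y = x then (p.count y : Int) + 1 else (p.count y : Int) := by
      intro y
      by_cases h : y = x
      · simp [h, List.count_append]
      · simp [List.count_append, h, Ne.symm h]
    have hd' : ∀ y, (d.insert x (d.getD x 0 + 1)).getD y 0 = ((p ++ [x]).count y : Int) := by
      intro y
      rw [PySem.Dict.getD_insert, hcnt y, hd y]
      by_cases h : y = x <;> simp [h, hd x]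
    have hres : (bStep n (d, (PySem.List.dedup p).filter
          (fun y => decide ((p.count y : Int) ≤ n))) x)
        = (d.insert x (d.getD x 0 + 1),
           (PySem.List.dedup (p ++ [x])).filter
             (fun y => decide (((p ++ [x]).count y : Int) ≤ n))) := by
      unfold bStep
      simp only [hd x]
      by_cases h1 : (p.count x : Int) + 1 = 1
      · -- first occurrence: x ∉ p
        have hxp : x ∉ p := by
          have : p.count x = 0 := by omega
          exact (List.count_eq_zero).mp this
        rw [if_pos h1, dedup_append_singleton, if_neg hxp, List.filter_append]
        have h2 : (PySem.List.dedup p).filter (fun y => decide (((p ++ [x]).count y : Int) ≤ n))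
            = (PySem.List.dedup p).filter (fun y => decide ((p.count y : Int) ≤ n)) := by
          refine List.filter_congr (fun y hy => ?_)
          have hyp : y ∈ p := by
            simpa [PySem.List.dedup_eq_ofList, PySem.Set.mem_ofList] using hy
          have hyx : y ≠ x := fun h => hxp (h ▸ hyp)
          rw [hcnt y, if_neg hyx]
        have h3 : ((p.count x : Int)) = 0 := by omega
        rw [h2]
        simp [h3, hn]
      · -- x ∈ p
        have hxc : 1 ≤ p.count x := by
          by_contra hc
          exact h1 (by omega)
        have hxp : x ∈ p := List.count_pos_iff.mp (by omega)
        rw [if_neg h1, dedup_append_singleton, if_pos hxp]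
        by_cases h2 : (p.count x : Int) + 1 = n + 1
        · -- count crosses n: evict x
          rw [if_pos h2]
          have hxres : x ∈ (PySem.List.dedup p).filter
              (fun y => decide ((p.count y : Int) ≤ n)) := by
            rw [List.mem_filter]
            refine ⟨by simpa [PySem.List.dedup_eq_ofList, PySem.Set.mem_ofList] using hxp, by simp; omega⟩
          rw [PySem.List.remove?_eq_some_erase _ _ hxres]
          simp only [Option.getD_some]
          refine congrArg (Prod.mk _) ?_
          refine (filter_flip_erase (PySem.List.nodup_dedup p) _ _ x ?_ ?_ ?_).symm
          · rw [hcnt x]; simp; omega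
          · simp; omega
          · intro y hyx; rw [hcnt y, if_neg hyx]
        · -- count stays on the same side of n
          rw [if_neg h2]
          refine congrArg _ (List.filter_congr (fun y _ => ?_)).symm
          rw [hcnt y]
          by_cases hyx : y = x
          · subst hyx; rw [if_pos rfl]
            by_cases h3 : (p.count y : Int) ≤ n <;> simp <;> omega
          · rw [if_neg hyx]
    calc ((x :: xs).foldl (bStep n)
          (d, (PySem.List.dedup p).filter (fun y => decide ((p.count y : Int) ≤ n)))).2
        = (xs.foldl (bStep n)
            (d.insert x (d.getD x 0 + 1),
             (PySem.List.dedup (p ++ [x])).filter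
               (fun y => decide (((p ++ [x]).count y : Int) ≤ n)))).2 := by
          rw [List.foldl_cons, hres]
      _ = (PySem.List.dedup ((p ++ [x]) ++ xs)).filter
            (fun y => decide ((((p ++ [x]) ++ xs).count y : Int) ≤ n)) :=
          ih (p ++ [x]) _ hd'
      _ = (PySem.List.dedup (p ++ x :: xs)).filter
            (fun y => decide (((p ++ x :: xs).count y : Int) ≤ n)) := by
          simp

-- ===== VERDICT =====
theorem solution5_spec : Claim_equal_solution5 := by
  intro data n _
  unfold Spec_solution5 solution5 solution5_alt
  by_cases hn : n > 0
  · rw [if_pos hn, if_neg (by omega)]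
    rw [PySem.Dict.foldl_insert_getD_add_one_eq_counter]
    simp only [PySem.Dict.items_counter]
    rw [foldl_items_pairs n (fun k => (List.count k data : Int))]
    have hb := bLoop_inv n (by omega) data [] PySem.Dict.empty (by simp)
    simp only [List.nil_append, PySem.List.dedup_eq_ofList] at hb
    simp at hb
    rw [List.nil_append]
    exact hb.symm
  · rw [if_neg hn, if_pos (by omega)]
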